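-- pv_equiv track=rewrite | github.com/tuto193/Financing_App | Financer.py | fill_spaces
-- ===== SOURCE A (Python) =====
-- def fill_spaces( s:str ) ->str:
--     """
--     Returns a (str) name
--     Takes a (str)name
--     """
--     newS: list = s.split(' ')
--     if len(newS) == 1:
--         return s
--     else:
--         s2:str = newS[0]
--         for i in range(1,len(newS)-1):
--             s2 += "_" + newS[i]
--         return s2
-- ===== SOURCE B (Python) =====
-- def fill_spaces(s: str) -> str:
--     """Single left-to-right scan: flush the current word into the joined
--     output at each space, discard the unfinished last word at the end."""
--     out = None
--     word = ""
--     for c in s: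
--         if c == ' ':
--             out = word if out is None else out + "_" + word
--             word = ""
--         else:
--             word += c
--     return s if out is None else out
-- ===== Notes on version B (the rewrite author's own statement) =====
-- stated objective: alternative
-- what changed: B replaces A's split-into-word-list plus index loop over range(1, len-1) by a single left-to-right character scan that maintains the joined output and the current word, flushing on each space and discarding the unfinished last word.
import Mathlib
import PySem

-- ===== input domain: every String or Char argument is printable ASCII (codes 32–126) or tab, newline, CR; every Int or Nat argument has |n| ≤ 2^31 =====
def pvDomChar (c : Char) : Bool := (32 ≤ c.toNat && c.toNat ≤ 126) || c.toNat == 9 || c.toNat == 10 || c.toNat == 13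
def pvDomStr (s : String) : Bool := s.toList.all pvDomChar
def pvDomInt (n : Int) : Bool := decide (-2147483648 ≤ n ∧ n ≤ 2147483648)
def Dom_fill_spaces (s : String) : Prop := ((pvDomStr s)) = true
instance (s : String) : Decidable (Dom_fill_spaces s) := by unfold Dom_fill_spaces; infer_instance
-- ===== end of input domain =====

-- B joins the words before the last space in one character scan instead of A's split-into-list plus index loop; same return value everywhere (alternative decomposition, same cost).

-- ===== PORT A =====
-- A: newS = s.split(' '); if len(newS) == 1 return s; else s2 = newS[0]; for i in range(1, len(newS)-1): s2 += "_" + newS[i]; return s2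
def fill_spaces (s : String) : String :=
  match PySem.Chars.split? s.toList [' '] with
  | none => s   -- unreachable: the separator ' ' is nonempty
  | some newS =>
    if newS.length = 1 then s
    else
      let s2 : List Char := PySem.List.pyGetD newS 0 []
      String.ofList ((PySem.List.pyRange 1 ((newS.length : Int) - 1) 1).foldl
        (fun s2 i => s2 ++ '_' :: PySem.List.pyGetD newS i []) s2)

-- ===== PORT B =====
-- B helper: `word if out is None else out + "_" + word`
def pushO (o : Option (List Char)) (x : List Char) : List Char :=
  match o with | none => x | some a => a ++ '_' :: x

-- B's loop body: flush the current word on a space, otherwise extend it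
def fillStep (p : Option (List Char) × List Char) (c : Char) : Option (List Char) × List Char :=
  if c = ' ' then (some (pushO p.1 p.2), []) else (p.1, p.2 ++ [c])

def fill_spaces_alt (s : String) : String :=
  match (s.toList.foldl fillStep (none, [])).1 with
  | none => s
  | some out => String.ofList out

-- ===== PRECONDITION & SPEC =====
def Spec_fill_spaces (s : String) (out : String) : Prop := out = fill_spaces_alt s
instance (s : String) (out : String) : Decidable (Spec_fill_spaces s out) := by unfold Spec_fill_spaces; infer_instance

-- ===== CLAIM (what is proved, stated in full; the proofs are below) =====
def Claim_equal_fill_spaces : Prop := ∀ (s : String), Dom_fill_spaces s → Spec_fill_spaces s (fill_spaces s)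

-- ===== LEMMAS AND PROOFS =====

-- Reference splitter: s.split(' ') as a structural recursion over the characters.
def splitSp : List Char → List (List Char)
  | [] => [[]]
  | c :: t =>
    if c = ' ' then [] :: splitSp t
    else
      match splitSp t with
      | [] => [[c]]
      | p :: ps => (c :: p) :: ps

-- prepend w onto the head part
def consHd (w : List Char) : List (List Char) → List (List Char)
  | [] => [w]
  | p :: ps => (w ++ p) :: ps

-- the "_"-joining step both programs perform
def fU (a p : List Char) : List Char := a ++ '_' :: p

lemma splitSp_ne_nil (cs : List Char) : splitSp cs ≠ [] := by
  cases cs with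
  | nil => simp [splitSp]
  | cons c t =>
    simp only [splitSp]
    split_ifs
    · simp
    · cases h : splitSp t <;> simp

lemma splitOn_go_eq (fuel : Nat) :
    ∀ (l cur : List Char) (acc : List (List Char)), l.length < fuel →
      PySem.Chars.splitOn.go [' '] fuel l cur acc
        = acc.reverse ++ consHd cur.reverse (splitSp l) := by
  induction fuel with
  | zero => intro l cur acc h; omega
  | succ n ih =>
    intro l cur acc h
    cases l with
    | nil =>
      simp [PySem.Chars.splitOn.go, splitSp, consHd]
    | cons c rest =>
      rw [PySem.Chars.splitOn.go]
      by_cases hc : c = ' '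
      · subst hc
        have hpre : List.isPrefixOf [' '] (' ' :: rest) = true := by
          simp [List.isPrefixOf]
        rw [if_pos hpre]
        simp only [List.length_cons, List.drop_succ_cons, List.length_nil, List.drop_zero]
        rw [ih rest [] (cur.reverse :: acc) (by simp at h ⊢; omega)]
        simp only [splitSp, List.reverse_cons, List.reverse_nil]
        cases hs : splitSp rest with
        | nil => exact absurd hs (splitSp_ne_nil rest)
        | cons p ps => simp [consHd]
      · have hpre : List.isPrefixOf [' '] (c :: rest) = false := by
          simp [List.isPrefixOf]; exact fun hh => absurd hh.symm hc
        rw [if_neg (by simp [hpre])]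
        rw [ih rest (c :: cur) acc (by simp at h ⊢; omega)]
        simp only [splitSp, if_neg hc, List.reverse_cons]
        cases hs : splitSp rest with
        | nil => exact absurd hs (splitSp_ne_nil rest)
        | cons p ps => simp [consHd]

lemma splitOn_eq_splitSp (cs : List Char) :
    PySem.Chars.splitOn cs [' '] = splitSp cs := by
  rw [PySem.Chars.splitOn, splitOn_go_eq (cs.length + 1) cs [] [] (by omega)]
  simp only [List.reverse_nil, List.nil_append]
  cases hs : splitSp cs with
  | nil => exact absurd hs (splitSp_ne_nil cs)
  | cons p ps => simp [consHd]

-- B's loop, characterised by the split of the scanned characters.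
lemma bfold (cs : List Char) : ∀ (o : Option (List Char)) (w : List Char),
    cs.foldl fillStep (o, w) =
      match splitSp cs with
      | [] => (o, w)
      | p :: ps =>
        if ps.isEmpty then (o, w ++ p)
        else (some (ps.dropLast.foldl fU (pushO o (w ++ p))), ps.getLastD []) := by
  induction cs with
  | nil => intro o w; simp [splitSp]
  | cons c t ih =>
    intro o w
    by_cases hc : c = ' '
    · subst hc
      simp only [List.foldl_cons, fillStep]
      rw [if_pos trivial]
      rw [ih (some (pushO o w)) []]
      simp only [splitSp]
      cases hs : splitSp t with
      | nil => exact absurd hs (splitSp_ne_nil t)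
      | cons q qs =>
        cases qs with
        | nil => simp [pushO]
        | cons q1 qt =>
          simp [pushO, fU]
    · simp only [List.foldl_cons, fillStep]
      rw [if_neg hc]
      rw [ih o (w ++ [c])]
      simp only [splitSp, if_neg hc]
      cases hs : splitSp t with
      | nil => exact absurd hs (splitSp_ne_nil t)
      | cons q qs => simp

-- A's index loop over range(1, len-1), as a fold over the words before the last.
lemma afold (parts : List (List Char)) (hne : parts ≠ []) :
    (PySem.List.pyRange 1 ((parts.length : Int) - 1) 1).foldl
        (fun s2 i => s2 ++ '_' :: PySem.List.pyGetD parts i []) (PySem.List.pyGetD parts 0 [])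
      = parts.dropLast.tail.foldl fU (PySem.List.pyGetD parts 0 []) := by
  have hpos : 0 < parts.length := List.length_pos_of_ne_nil hne
  have hlen : ((parts.dropLast.length : Int)) = (parts.length : Int) - 1 := by
    have h := @List.length_dropLast _ parts
    omega
  rw [show PySem.List.pyRange 1 ((parts.length : Int) - 1) 1
        = PySem.List.pyRange 1 ((parts.dropLast.length : Int)) 1 by rw [hlen]]
  rw [PySem.List.foldl_congr_mem _ _
        (fun s2 i => fU s2 (PySem.List.pyGetD parts.dropLast i [])) _ ?hcong]
  case hcong =>
    intro a i hi
    rw [PySem.List.mem_pyRange_one] at hi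
    show a ++ '_' :: PySem.List.pyGetD parts i [] = fU a (PySem.List.pyGetD parts.dropLast i [])
    rw [fU]
    congr 1
    rw [PySem.List.pyGetD_eq_getElem parts [] (by omega) (by omega),
        PySem.List.pyGetD_eq_getElem parts.dropLast [] (by omega) (by omega)]
    rw [List.getElem_dropLast]
  · rw [PySem.List.foldl_pyRange_pyGetD' parts.dropLast ([] : List Char) fU _ (by norm_num)]
    simp [List.drop_one]

-- ===== VERDICT (by name: the statement is the Claim_ definition above) =====
theorem fill_spaces_spec : Claim_equal_fill_spaces := by
  intro s _
  unfold Spec_fill_spaces fill_spaces fill_spaces_alt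
  simp only [PySem.Chars.split?, List.isEmpty_cons, Bool.false_eq_true, if_false,
    splitOn_eq_splitSp]
  rw [bfold s.toList none []]
  cases hs : splitSp s.toList with
  | nil => exact absurd hs (splitSp_ne_nil s.toList)
  | cons p ps =>
    cases ps with
    | nil => simp
    | cons q qs =>
      simp only [List.isEmpty_cons, Bool.false_eq_true, if_false, List.length_cons]
      rw [if_neg (by simp)]
      rw [show ((qs.length + 1 + 1 : Nat) : Int) = ((p :: q :: qs).length : Int) by simp]
      rw [afold (p :: q :: qs) (by simp)]
      have h0 : PySem.List.pyGetD (p :: q :: qs) 0 [] = p := by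
        rw [PySem.List.pyGetD_eq_getElem _ [] (by omega) (by exact_mod_cast Nat.succ_pos _)]
        simp
      simp only [h0, List.dropLast_cons₂, List.tail_cons, pushO, List.nil_append]
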